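-- pv_equiv track=rewrite | github.com/Yunosuke-Motohashi/All_argorithm | at_coder演習/3_binary_search/b_14.py | make_sum_list
-- ===== SOURCE A (Python) =====
-- def make_sum_list(A) -> list:
--     sum_list = []
--     for bit in range(1 << len(A)):
--         # 0から2**len(A)-1までのbit全探索
--         sum = 0
--         for i in range((len(A))):
--             if bit & (1 << i):
--                 # i番目が1かかくにんする, i盤面が0の時は&演算で0になる
--                 sum += A[i]
--         sum_list.append(sum)
--     return sum_list
-- ===== SOURCE B (Python) =====
-- def make_sum_list(A) -> list:
--     # Subset-sum table by doubling: each element doubles the table,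
--     # appending the shifted copy (O(2**n) instead of O(n*2**n)).
--     sums = [0]
--     for a in A:
--         sums += [s + a for s in sums]
--     return sums
-- ===== Notes on version B (the rewrite author's own statement) =====
-- stated objective: faster
-- what changed: Replaces the per-bitmask inner scan over all n positions with a table-doubling DP: each element appends a shifted copy of the current subset-sum table, so each output entry costs O(1).
import Mathlib
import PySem

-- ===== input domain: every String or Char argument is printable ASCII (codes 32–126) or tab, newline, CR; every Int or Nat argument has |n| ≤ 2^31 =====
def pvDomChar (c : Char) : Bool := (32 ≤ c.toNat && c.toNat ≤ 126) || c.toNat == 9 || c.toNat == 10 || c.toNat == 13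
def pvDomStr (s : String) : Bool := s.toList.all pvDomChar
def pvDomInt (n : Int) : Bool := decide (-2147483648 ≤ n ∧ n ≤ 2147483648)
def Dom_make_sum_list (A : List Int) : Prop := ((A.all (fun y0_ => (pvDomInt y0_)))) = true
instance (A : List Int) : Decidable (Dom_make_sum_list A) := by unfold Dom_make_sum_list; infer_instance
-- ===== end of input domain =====

-- B replaces A's per-bitmask scan over all positions by a table-doubling DP
-- (each element appends a shifted copy of the table): objective = faster (asymptotic).


-- ===== PORT A =====
-- for bit in range(1 << len(A)):  sum = 0; for i in range(len(A)): if bit & (1 << i): sum += A[i];  sum_list.append(sum)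
def make_sum_list (A : List Int) : List Int :=
  (PySem.List.pyRange 0 ((1 : Int) <<< A.length) 1).foldl
    (fun sum_list bit =>
      sum_list ++ [(PySem.List.pyRange 0 (A.length : Int) 1).foldl
        (fun sum i =>
          if PySem.Int.band bit ((1 : Int) <<< i.toNat) ≠ 0
          then sum + PySem.List.pyGetD A i 0 else sum) 0])
    []

-- ===== PORT B =====
-- sums = [0]; for a in A: sums += [s + a for s in sums]
def make_sum_list_alt (A : List Int) : List Int :=
  A.foldl (fun sums a => sums ++ sums.map (fun s => s + a)) [0]

-- ===== PRECONDITION & SPEC =====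
def Spec_make_sum_list (A : List Int) (out : List Int) : Prop := out = make_sum_list_alt A
instance (A : List Int) (out : List Int) : Decidable (Spec_make_sum_list A out) := by unfold Spec_make_sum_list; infer_instance

-- ===== CLAIM (what is proved, stated in full; the proofs are below) =====
def Claim_equal_make_sum_list : Prop := ∀ (A : List Int), Dom_make_sum_list A → Spec_make_sum_list A (make_sum_list A)

-- ===== LEMMAS AND PROOFS =====

-- A's inner loop: the sum of A[i] over the set bits of `bit`
def gsum (A : List Int) (bit : Int) : Int :=
  (PySem.List.pyRange 0 (A.length : Int) 1).foldl
    (fun sum i =>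
      if PySem.Int.band bit ((1 : Int) <<< i.toNat) ≠ 0
      then sum + PySem.List.pyGetD A i 0 else sum) 0

theorem make_sum_list_eq_map (A : List Int) :
    make_sum_list A =
      (List.range (2 ^ A.length)).map (fun k : Nat => gsum A (k : Int)) := by
  show (PySem.List.pyRange 0 ((1 : Int) <<< A.length) 1).foldl
      (fun sum_list bit => sum_list ++ [gsum A bit]) [] = _
  rw [PySem.List.foldl_append_singleton_eq_map (gsum A)]
  rw [show (1 : Int) <<< A.length = ((2 ^ A.length : Nat) : Int) by
    simp [Int.shiftLeft_eq]]
  rw [PySem.List.pyRange_zero_natCast, List.map_map]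
  rfl

theorem band_pow_iff (b : Int) (k : Nat) (h0 : 0 ≤ b) :
    (PySem.Int.band b ((1 : Int) <<< ((k : Nat) : Int)) ≠ 0) ↔ b.toNat.testBit k := by
  rw [show (1 : Int) <<< ((k : Nat) : Int) = ((2 ^ k : Nat) : Int) from Int.one_shiftLeft k]
  rw [PySem.Int.band_of_nonneg h0 (by positivity)]
  rw [Int.toNat_natCast, Nat.and_two_pow]
  rcases h : b.toNat.testBit k <;> simp

-- split A's inner loop over range(len(A)+1) into range(len(A)) ++ [len(A)]
theorem gsum_append (A : List Int) (a bit : Int) :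
    gsum (A ++ [a]) bit =
      (if PySem.Int.band bit ((1 : Int) <<< ((((A.length : Int)).toNat : Nat) : Int)) ≠ 0
       then (PySem.List.pyRange 0 (A.length : Int) 1).foldl
          (fun sum i =>
            if PySem.Int.band bit ((1 : Int) <<< i.toNat) ≠ 0
            then sum + PySem.List.pyGetD (A ++ [a]) i 0 else sum) 0 + a
       else (PySem.List.pyRange 0 (A.length : Int) 1).foldl
          (fun sum i =>
            if PySem.Int.band bit ((1 : Int) <<< i.toNat) ≠ 0
            then sum + PySem.List.pyGetD (A ++ [a]) i 0 else sum) 0) := by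
  unfold gsum
  rw [show ((A ++ [a]).length : Int) = (A.length : Int) + 1 by simp]
  rw [PySem.List.pyRange_one_succ_right (by positivity)]
  rw [List.foldl_append]
  simp only [List.foldl_cons, List.foldl_nil]
  split_ifs with h
  · congr 1
    rw [PySem.List.pyGetD_eq_getElem _ _ (by positivity) (by simp)]
    simp
  · rfl

-- inside range(len(A)) the extended list reads the same entries as A
theorem foldl_getD_append (A : List Int) (a bit : Int) :
    (PySem.List.pyRange 0 (A.length : Int) 1).foldl
        (fun sum i =>
          if PySem.Int.band bit ((1 : Int) <<< i.toNat) ≠ 0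
          then sum + PySem.List.pyGetD (A ++ [a]) i 0 else sum) 0 =
      (PySem.List.pyRange 0 (A.length : Int) 1).foldl
        (fun sum i =>
          if PySem.Int.band bit ((1 : Int) <<< i.toNat) ≠ 0
          then sum + PySem.List.pyGetD A i 0 else sum) 0 := by
  refine PySem.List.foldl_congr_mem _ _ _ _ (fun acc x hx => ?_)
  rw [PySem.List.mem_pyRange_one] at hx
  rw [PySem.List.pyGetD_eq_getElem (A ++ [a]) _ hx.1 (by simp; omega),
      PySem.List.pyGetD_eq_getElem A _ hx.1 (by omega)]
  rw [List.getElem_append_left (by omega)]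

theorem gsum_append_lt (A : List Int) (a : Int) (k : Nat) (hk : k < 2 ^ A.length) :
    gsum (A ++ [a]) (k : Int) = gsum A (k : Int) := by
  rw [gsum_append]
  rw [if_neg (by
    rw [band_pow_iff _ _ (by positivity), Int.toNat_natCast, Int.toNat_natCast]
    simp [Nat.testBit_lt_two_pow hk])]
  rw [foldl_getD_append]
  rfl

theorem gsum_append_ge (A : List Int) (a : Int) (k : Nat) (hk : k < 2 ^ A.length) :
    gsum (A ++ [a]) ((2 ^ A.length + k : Nat) : Int) = gsum A (k : Int) + a := by
  rw [gsum_append]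
  rw [if_pos (by
    rw [band_pow_iff _ _ (by positivity), Int.toNat_natCast, Int.toNat_natCast]
    rw [Nat.testBit_two_pow_add_eq]
    simp [Nat.testBit_lt_two_pow hk])]
  congr 1
  rw [foldl_getD_append]
  unfold gsum
  refine PySem.List.foldl_congr_mem _ _ _ _ (fun acc x hx => ?_)
  rw [PySem.List.mem_pyRange_one] at hx
  congr 1
  rw [eq_iff_iff]
  rw [band_pow_iff _ _ (by positivity), band_pow_iff _ _ (by positivity)]
  rw [Int.toNat_natCast, Int.toNat_natCast]
  rw [Nat.testBit_two_pow_add_gt (by omega)]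

theorem ports_eq (A : List Int) : make_sum_list A = make_sum_list_alt A := by
  induction A using List.reverseRecOn with
  | nil => decide
  | append_singleton A a ih =>
    rw [make_sum_list_eq_map]
    unfold make_sum_list_alt at *
    rw [List.foldl_append, ← ih]
    rw [make_sum_list_eq_map]
    simp only [List.foldl_cons, List.foldl_nil]
    rw [List.length_append, List.length_singleton, pow_succ, mul_two, List.range_add]
    rw [List.map_append, List.map_map, List.map_map]
    congr 1
    · exact List.map_congr_left (fun k hk =>
        gsum_append_lt A a k (List.mem_range.mp hk))
    · exact List.map_congr_left (fun k hk => by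
        simpa using gsum_append_ge A a k (List.mem_range.mp hk))

-- ===== VERDICT (by name: the statement is the Claim_ definition above) =====
theorem make_sum_list_spec : Claim_equal_make_sum_list :=
  fun A _ => ports_eq A
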